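-- pv_equiv track=rewrite | github.com/Yee172/Code_Library | ProjectEuler/Problem_0090.py | check
-- ===== SOURCE A (Python) =====
-- need = ['01', '04', '09', '16', '25', '36', '49', '64', '81']
--
-- def check(cubes):
--     for i, cube in enumerate(cubes):
--         cube = set(cube)
--         if '6' in cube or '9' in cube:
--             cube.add('6')
--             cube.add('9')
--         cubes[i] = cube
--     a, b = cubes
--     for nd in need:
--         x, y = nd
--         if not (x in a and y in b or x in b and y in a):
--             return False
--     return True
-- ===== SOURCE B (Python) =====
-- need = ['01', '04', '09', '16', '25', '36', '49', '64', '81']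
--
-- def check(cubes):
--     for i, cube in enumerate(cubes):
--         cube = set(cube)
--         if '6' in cube or '9' in cube:
--             cube.add('6')
--             cube.add('9')
--         cubes[i] = cube
--     a, b = cubes
--     pairs = {(d1, d2) for d1 in a for d2 in b} | {(d2, d1) for d1 in a for d2 in b}
--     return all((x, y) in pairs for x, y in need)
-- ===== Notes on version B (the rewrite author's own statement) =====
-- stated objective: alternative
-- what changed: Instead of testing each of the nine squares with a bespoke OR-of-two-orderings membership condition, B precomputes one set of all reachable ordered (face, face) pairs from the two cubes and then does a single all() subset pass over need.
-- outside the precondition, e.g. on check([['1', '2'], ['3', '4'], ['5', '6']]): A raises ValueError, B raises ValueError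
import Mathlib
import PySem

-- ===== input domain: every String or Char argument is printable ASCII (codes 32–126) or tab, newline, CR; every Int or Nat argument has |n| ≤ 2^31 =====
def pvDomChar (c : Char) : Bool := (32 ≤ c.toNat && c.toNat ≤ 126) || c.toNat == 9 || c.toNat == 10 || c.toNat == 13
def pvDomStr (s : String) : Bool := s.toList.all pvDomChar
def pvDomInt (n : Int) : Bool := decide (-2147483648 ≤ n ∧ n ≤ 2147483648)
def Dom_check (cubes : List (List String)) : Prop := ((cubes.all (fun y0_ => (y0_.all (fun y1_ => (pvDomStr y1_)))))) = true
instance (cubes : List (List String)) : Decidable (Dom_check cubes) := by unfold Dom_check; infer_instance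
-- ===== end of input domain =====

-- B replaces the nine OR-of-two-orderings membership tests by one precomputed set of
-- reachable (face, face) pairs followed by a single all-subset pass (objective: alternative);
-- both A and B mutate the argument list in place in Python — equivalence here is about the
-- RETURN value (B performs the same mutation).

-- the module constant need = ['01', …, '81']
def need : List String := ["01", "04", "09", "16", "25", "36", "49", "64", "81"]

-- ===== PORT A =====
def check (cubes : List (List String)) : Bool :=
  -- for i, cube in enumerate(cubes): cubes[i] = expanded set
  let cubes' := cubes.map (fun cube =>
    let s := PySem.Set.ofList cube
    if s.contains "6" || s.contains "9" then (s.add "6").add "9" else s)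
  -- a, b = cubes  (raises ValueError unless exactly two cubes; excluded by Pre_check)
  match cubes' with
  | [a, b] =>
    -- for nd in need: x, y = nd; if not (...): return False / return True
    need.all (fun nd =>
      match nd.toList with
      | [x, y] =>
          (a.contains (String.ofList [x]) && b.contains (String.ofList [y])) ||
          (b.contains (String.ofList [x]) && a.contains (String.ofList [y]))
      | _ => false)  -- unreachable: every element of need has two characters
  | _ => false  -- unreachable under Pre_check

-- ===== PORT B =====
-- Source B's module constant need (B's own copy)
def need_alt : List String := ["01", "04", "09", "16", "25", "36", "49", "64", "81"]

def check_alt (cubes : List (List String)) : Bool :=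
  let cubes' := cubes.map (fun cube =>
    let s := PySem.Set.ofList cube
    if s.contains "6" || s.contains "9" then (s.add "6").add "9" else s)
  -- a, b = cubes  (raises ValueError unless exactly two cubes; excluded by Pre_check)
  if cubes'.length == 2 then
    let a := cubes'.getD 0 []
    let b := cubes'.getD 1 []
    -- pairs = {(d1, d2) for d1 in a for d2 in b} | {(d2, d1) for d1 in a for d2 in b}
    let pairs := PySem.Set.union
      (PySem.Set.ofList (a.flatMap (fun d1 => b.map (fun d2 => (d1, d2)))))
      (a.flatMap (fun d1 => b.map (fun d2 => (d2, d1))))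
    -- all((x, y) in pairs for x, y in need)  (every element of need has exactly two characters)
    need_alt.all (fun nd =>
      let cs := nd.toList
      pairs.contains (String.ofList (cs.take 1), String.ofList (cs.drop 1)))
  else false  -- unreachable under Pre_check

-- ===== PRECONDITION & SPEC =====
-- A's 'a, b = cubes' raises ValueError unless there are exactly two cubes.
def Pre_check (cubes : List (List String)) : Prop := cubes.length = 2
instance (cubes : List (List String)) : Decidable (Pre_check cubes) := by unfold Pre_check; infer_instance
def pvWitness_check : List (List String) := [["0", "5", "6", "1", "2", "3"], ["9", "4", "8", "1", "2", "7"]]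

def Spec_check (cubes : List (List String)) (out : Bool) : Prop := out = check_alt cubes
instance (cubes : List (List String)) (out : Bool) : Decidable (Spec_check cubes out) := by unfold Spec_check; infer_instance

-- ===== CLAIM (what is proved, stated in full; the proofs are below) =====
def Claim_equal_check : Prop := ∀ (cubes : List (List String)), Dom_check cubes → Pre_check cubes → Spec_check cubes (check cubes)

-- ===== LEMMAS AND PROOFS =====

-- membership in B's precomputed pair set is exactly A's two-orderings test
theorem pairs_contains (a b : List String) (x y : String) :
    List.contains
      (PySem.Set.union
        (PySem.Set.ofList (a.flatMap (fun d1 => b.map (fun d2 => (d1, d2)))))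
        (a.flatMap (fun d1 => b.map (fun d2 => (d2, d1))))) (x, y)
    = ((List.contains a x && List.contains b y) || (List.contains b x && List.contains a y)) := by
  simp only [List.contains_eq_mem,
    ← Bool.decide_and, ← Bool.decide_or, decide_eq_decide]
  simp only [PySem.Set.mem_union, PySem.Set.mem_ofList, List.mem_flatMap, List.mem_map,
    Prod.mk.injEq]
  constructor
  · rintro (⟨d1, h1, d2, h2, hx, hy⟩ | ⟨d1, h1, d2, h2, hx, hy⟩)
    · exact Or.inl ⟨hx ▸ h1, hy ▸ h2⟩
    · exact Or.inr ⟨hx ▸ h2, hy ▸ h1⟩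
  · rintro (⟨hx, hy⟩ | ⟨hx, hy⟩)
    · exact Or.inl ⟨x, hx, y, hy, rfl, rfl⟩
    · exact Or.inr ⟨y, hy, x, hx, rfl, rfl⟩

-- ===== VERDICT (by name: the statement is the Claim_ definition above) =====
theorem check_spec : Claim_equal_check := by
  intro cubes _ hpre
  unfold Spec_check check check_alt
  have hl : (cubes.map (fun cube =>
      let s := PySem.Set.ofList cube
      if s.contains "6" || s.contains "9" then (s.add "6").add "9" else s)).length = 2 := by
    rw [List.length_map]; exact hpre
  cases h : cubes.map (fun cube =>
      let s := PySem.Set.ofList cube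
      if s.contains "6" || s.contains "9" then (s.add "6").add "9" else s) with
  | nil => rw [h] at hl; simp at hl
  | cons a t =>
    cases t with
    | nil => rw [h] at hl; simp at hl
    | cons b t' =>
      cases t' with
      | nil =>
        simp only [need, need_alt, List.all_cons, List.all_nil, List.length_cons,
          List.length_nil, List.getD, beq_self_eq_true, if_true,
          List.take, List.drop,
          show ("01":String).toList = ['0','1'] from rfl, show ("04":String).toList = ['0','4'] from rfl, show ("09":String).toList = ['0','9'] from rfl, show ("16":String).toList = ['1','6'] from rfl, show ("25":String).toList = ['2','5'] from rfl, show ("36":String).toList = ['3','6'] from rfl, show ("49":String).toList = ['4','9'] from rfl, show ("64":String).toList = ['6','4'] from rfl, show ("81":String).toList = ['8','1'] from rfl,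
          pairs_contains, PySem.Set.contains_eq_listContains]
        norm_num
      | cons c t'' => rw [h] at hl; simp at hl
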